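-- pv_equiv track=rewrite | github.com/pinkynrg/adventofcode-2021 | day-13/solution.py | fold_horizontal
-- ===== SOURCE A (Python) =====
-- def fold_horizontal(paper, fold):
--     new_paper = []
--     top = paper[:fold]
--     bottom = paper[fold+1:]
--     width = len(paper[0]) if len(paper) > 0 else 0
--     new_height = max(len(top), len(bottom))
--     mirrored_bottom = bottom[::-1]
--     for y in range(0, new_height):
--         top_row = top[-(y+1)] if len(top)-y > 0  else ["-"] * width
--         bottom_row = mirrored_bottom[-(y+1)] if len(mirrored_bottom)-y > 0  else ["-"] * width
--         row = []
--         for x in range(0, width):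
--             point = "▓" if top_row[x] == "▓" or bottom_row[x] == "▓" else "-"
--             row.append(point)
--         new_paper.append(row)
--     return new_paper[::-1]
-- ===== SOURCE B (Python) =====
-- def fold_horizontal(paper, fold):
--     top = paper[:fold]
--     bottom = paper[fold+1:]
--     width = len(paper[0]) if paper else 0
--     height = max(len(top), len(bottom))
--     dots = set()
--     for ty, row in enumerate(top):
--         for x in range(width):
--             if row[x] == "\u2593":
--                 dots.add((height - len(top) + ty, x))
--     for by, row in enumerate(bottom):
--         for x in range(width):
--             if row[x] == "\u2593":
--                 dots.add((height - by - 1, x))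
--     return [["\u2593" if (r, x) in dots else "-" for x in range(width)]
--             for r in range(height)]
-- ===== Notes on version B (the rewrite author's own statement) =====
-- stated objective: alternative
-- what changed: B scatters: it scans each input cell of the two halves once, putting the coordinates of filled ('▓') cells (with the fold's row remapping) into a set, then renders the output grid by membership tests, instead of A's per-output-cell gather with negative mirrored indexing built bottom-up and reversed.
import Mathlib
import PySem

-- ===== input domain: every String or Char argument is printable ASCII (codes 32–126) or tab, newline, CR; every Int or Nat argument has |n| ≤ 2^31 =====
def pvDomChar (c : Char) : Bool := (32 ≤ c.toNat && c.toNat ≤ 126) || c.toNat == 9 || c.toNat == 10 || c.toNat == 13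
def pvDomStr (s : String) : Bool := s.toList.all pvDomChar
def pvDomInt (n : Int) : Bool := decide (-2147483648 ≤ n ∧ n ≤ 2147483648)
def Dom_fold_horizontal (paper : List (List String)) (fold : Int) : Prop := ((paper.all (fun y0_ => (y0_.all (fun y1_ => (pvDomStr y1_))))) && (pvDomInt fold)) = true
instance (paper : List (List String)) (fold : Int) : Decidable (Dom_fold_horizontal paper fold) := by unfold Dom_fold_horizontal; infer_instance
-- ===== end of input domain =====

-- B replaces A's per-output-cell gather (negative mirrored indexing, built bottom-up then
-- reversed) by a scatter: one scan over the input cells collecting the coordinates of '▓'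
-- cells into a set, then a render pass testing membership.

-- ===== PORT A =====
def fold_horizontal (paper : List (List String)) (fold : Int) : List (List String) :=
  let top := PySem.List.slice paper none (some fold)
  let bottom := PySem.List.slice paper (some (fold + 1)) none
  let width : Nat := if paper.length > 0 then (paper.headD []).length else 0
  let newHeight : Nat := max top.length bottom.length
  let mirroredBottom := bottom.reverse
  let newPaper := (List.range newHeight).foldl (fun np (y : Nat) =>
    let topRow := if y < top.length then PySem.List.pyGetD top (-((y : Int) + 1)) [] else List.replicate width "-"
    let bottomRow := if y < mirroredBottom.length then PySem.List.pyGetD mirroredBottom (-((y : Int) + 1)) [] else List.replicate width "-"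
    let row := (List.range width).foldl (fun row (x : Nat) =>
      row ++ [if PySem.List.pyGetD topRow (x : Int) "" = "▓" ∨ PySem.List.pyGetD bottomRow (x : Int) "" = "▓" then "▓" else "-"]) []
    np ++ [row]) []
  newPaper.reverse

-- ===== PORT B =====
-- the set of output coordinates of '▓' cells (Source B's `dots`)
def pvDots (top bottom : List (List String)) (width height : Nat) : PySem.Set (Int × Int) :=
  let d1 := (PySem.List.enumerate top 0).foldl (fun d p =>
    (List.range width).foldl (fun d (x : Nat) =>
      if PySem.List.pyGetD p.2 (x : Int) "" = "▓"
      then PySem.Set.add d ((height : Int) - top.length + p.1, (x : Int)) else d) d) PySem.Set.empty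
  (PySem.List.enumerate bottom 0).foldl (fun d p =>
    (List.range width).foldl (fun d (x : Nat) =>
      if PySem.List.pyGetD p.2 (x : Int) "" = "▓"
      then PySem.Set.add d ((height : Int) - p.1 - 1, (x : Int)) else d) d) d1

def fold_horizontal_alt (paper : List (List String)) (fold : Int) : List (List String) :=
  let top := PySem.List.slice paper none (some fold)
  let bottom := PySem.List.slice paper (some (fold + 1)) none
  let width : Nat := if paper.length > 0 then (paper.headD []).length else 0
  let height : Nat := max top.length bottom.length
  let dots := pvDots top bottom width height
  (List.range height).map (fun (r : Nat) => (List.range width).map (fun (x : Nat) =>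
    if ((r : Int), (x : Int)) ∈ dots then "▓" else "-"))

-- ===== PRECONDITION & SPEC =====
-- Pre_ excludes ragged grids in which some row of the two folded halves is shorter than the
-- first row: A raises IndexError there.
def Pre_fold_horizontal (paper : List (List String)) (fold : Int) : Prop :=
  ∀ row ∈ PySem.List.slice paper none (some fold) ++ PySem.List.slice paper (some (fold + 1)) none,
    (paper.headD []).length ≤ row.length
instance (paper : List (List String)) (fold : Int) : Decidable (Pre_fold_horizontal paper fold) := by unfold Pre_fold_horizontal; infer_instance
def pvWitness_fold_horizontal : List (List String) × Int := ([["-", "x"], ["x", "-"], ["-", "-"]], 1)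

def Spec_fold_horizontal (paper : List (List String)) (fold : Int) (out : List (List String)) : Prop := out = fold_horizontal_alt paper fold
instance (paper : List (List String)) (fold : Int) (out : List (List String)) : Decidable (Spec_fold_horizontal paper fold out) := by unfold Spec_fold_horizontal; infer_instance

-- ===== CLAIM (what is proved, stated in full; the proofs are below) =====
def Claim_equal_fold_horizontal : Prop := ∀ (paper : List (List String)) (fold : Int), Dom_fold_horizontal paper fold → Pre_fold_horizontal paper fold → Spec_fold_horizontal paper fold (fold_horizontal paper fold)

-- ===== LEMMAS AND PROOFS =====

-- membership through a fold of set-transformers each of which adds exactly the a with Q b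
lemma pv_mem_foldl {α β : Type} (F : PySem.Set α → β → PySem.Set α) (Q : β → Prop) (a : α)
    (h : ∀ d b, a ∈ F d b ↔ a ∈ d ∨ Q b) :
    ∀ (l : List β) (d : PySem.Set α), a ∈ l.foldl F d ↔ a ∈ d ∨ ∃ b ∈ l, Q b := by
  intro l
  induction l with
  | nil => simp
  | cons b l ih =>
    intro d
    rw [List.foldl_cons, ih, h]
    constructor
    · rintro ((hd | hq) | ⟨b', hb', hq⟩)
      · exact Or.inl hd
      · exact Or.inr ⟨b, List.mem_cons_self .., hq⟩
      · exact Or.inr ⟨b', List.mem_cons_of_mem _ hb', hq⟩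
    · rintro (hd | ⟨b', hb', hq⟩)
      · exact Or.inl (Or.inl hd)
      · rcases List.mem_cons.mp hb' with h' | h'
        · subst h'
          exact Or.inl (Or.inr hq)
        · exact Or.inr ⟨b', h', hq⟩

-- the inner column scan adds exactly the '▓' columns of one row at output row c
lemma pv_mem_inner (a : Int × Int) (c : Int) (row : List String) (W : Nat) (d : PySem.Set (Int × Int)) :
    a ∈ (List.range W).foldl (fun d (x : Nat) =>
        if PySem.List.pyGetD row (x : Int) "" = "▓" then PySem.Set.add d (c, (x : Int)) else d) d
    ↔ a ∈ d ∨ ∃ x < W, row.getD x "" = "▓" ∧ (c, (x : Int)) = a := by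
  rw [pv_mem_foldl _ (fun (x : Nat) => row.getD x "" = "▓" ∧ (c, (x : Int)) = a) a ?_]
  · simp only [List.mem_range]
  · intro d x
    simp only [PySem.List.pyGetD_natCast]
    split_ifs with hc
    · rw [PySem.Set.mem_add]
      constructor
      · rintro (h | h)
        · exact Or.inl h
        · exact Or.inr ⟨hc, h.symm⟩
      · rintro (h | ⟨_, h⟩)
        · exact Or.inl h
        · exact Or.inr h.symm
    · constructor
      · exact Or.inl
      · rintro (h | ⟨h1, _⟩)
        · exact h
        · exact absurd h1 hc

-- characterisation of the coordinate set built by pvDots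
lemma pv_mem_dots (T Bt : List (List String)) (W H : Nat) (a : Int × Int) :
    a ∈ pvDots T Bt W H ↔
      (∃ k, ∃ _ : k < T.length, ∃ x < W, (T[k]).getD x "" = "▓" ∧
          ((H : Int) - T.length + k, (x : Int)) = a) ∨
      (∃ k, ∃ _ : k < Bt.length, ∃ x < W, (Bt[k]).getD x "" = "▓" ∧
          ((H : Int) - k - 1, (x : Int)) = a) := by
  unfold pvDots
  rw [pv_mem_foldl _ (fun p => ∃ x < W, (p.2).getD x "" = "▓" ∧ ((H : Int) - p.1 - 1, (x : Int)) = a) a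
      (fun d p => pv_mem_inner a ((H : Int) - p.1 - 1) p.2 W d)]
  rw [pv_mem_foldl _ (fun p => ∃ x < W, (p.2).getD x "" = "▓" ∧ ((H : Int) - T.length + p.1, (x : Int)) = a) a
      (fun d p => pv_mem_inner a ((H : Int) - T.length + p.1) p.2 W d)]
  simp only [PySem.Set.empty, List.not_mem_nil, false_or]
  constructor
  · rintro (⟨p, hp, hQ⟩ | ⟨p, hp, hQ⟩)
    · obtain ⟨k, hk, hpk⟩ := (PySem.List.mem_enumerate_iff _ _ _).mp hp
      subst hpk
      exact Or.inl ⟨k, hk, by simpa using hQ⟩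
    · obtain ⟨k, hk, hpk⟩ := (PySem.List.mem_enumerate_iff _ _ _).mp hp
      subst hpk
      exact Or.inr ⟨k, hk, by simpa using hQ⟩
  · rintro (⟨k, hk, hQ⟩ | ⟨k, hk, hQ⟩)
    · exact Or.inl ⟨((k : Int), T[k]), (PySem.List.mem_enumerate_iff _ _ _).mpr ⟨k, hk, by simp⟩, by simpa using hQ⟩
    · exact Or.inr ⟨((k : Int), Bt[k]), (PySem.List.mem_enumerate_iff _ _ _).mpr ⟨k, hk, by simp⟩, by simpa using hQ⟩

-- A's gather body equals B's scatter-and-render, for arbitrary halves T, Bt and width W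
lemma pv_core (T Bt : List (List String)) (W : Nat) :
    (((List.range (max T.length Bt.length)).foldl (fun np (y : Nat) =>
        let topRow := if y < T.length then PySem.List.pyGetD T (-((y : Int) + 1)) [] else List.replicate W "-"
        let bottomRow := if y < Bt.reverse.length then PySem.List.pyGetD Bt.reverse (-((y : Int) + 1)) [] else List.replicate W "-"
        let row := (List.range W).foldl (fun row (x : Nat) =>
          row ++ [if PySem.List.pyGetD topRow (x : Int) "" = "▓" ∨ PySem.List.pyGetD bottomRow (x : Int) "" = "▓" then "▓" else "-"]) []
        np ++ [row]) []).reverse)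
    = (List.range (max T.length Bt.length)).map (fun (r : Nat) => (List.range W).map (fun (x : Nat) =>
        if ((r : Int), (x : Int)) ∈ pvDots T Bt W (max T.length Bt.length) then "▓" else "-")) := by
  have hTH : T.length ≤ max T.length Bt.length := le_max_left _ _
  have hBH : Bt.length ≤ max T.length Bt.length := le_max_right _ _
  generalize hH : max T.length Bt.length = H at *
  simp only [PySem.List.foldl_append_singleton_eq_map, List.nil_append, List.length_reverse]
  apply List.ext_getElem
  · simp
  · intro r h1 h2
    have hr : r < H := by simpa using h2
    rw [List.getElem_reverse]
    simp only [List.length_map, List.length_range]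
    rw [List.getElem_map, List.getElem_map, List.getElem_range, List.getElem_range]
    apply List.map_congr_left
    intro x hxmem
    have hx : x < W := List.mem_range.mp hxmem
    generalize hy : H - 1 - r = y
    have hycast : (-((y : Int) + 1)) = -(((y + 1 : Nat) : Int)) := by push_cast; ring
    have htop : ∀ _ : y < T.length,
        PySem.List.pyGetD T (-((y : Int) + 1)) [] = T[T.length - (y + 1)]'(by omega) := by
      intro hyt
      rw [hycast, PySem.List.pyGetD_neg_natCast T (y + 1) [] (by omega) (by omega)]
    have hbot : ∀ _ : y < Bt.length,
        PySem.List.pyGetD Bt.reverse (-((y : Int) + 1)) [] = Bt[y]'(by omega) := by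
      intro hyb
      rw [hycast, PySem.List.pyGetD_neg_natCast Bt.reverse (y + 1) []
        (by omega) (by simpa using (by omega : y + 1 ≤ Bt.length))]
      simp only [List.getElem_reverse, List.length_reverse]
      congr 1
      omega
    congr 1
    simp only [eq_iff_iff]
    rw [pv_mem_dots]
    constructor
    · rintro (ht | hb)
      · by_cases hyt : y < T.length
        · rw [if_pos hyt, htop hyt, PySem.List.pyGetD_natCast] at ht
          refine Or.inl ⟨T.length - (y + 1), by omega, x, hx, ht, ?_⟩
          simp only [Prod.mk.injEq]
          exact ⟨by omega, trivial⟩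
        · rw [if_neg hyt, PySem.List.pyGetD_natCast,
            List.getD_eq_getElem _ "" (by simpa using hx)] at ht
          simp at ht
      · by_cases hyb : y < Bt.length
        · rw [if_pos hyb, hbot hyb, PySem.List.pyGetD_natCast] at hb
          refine Or.inr ⟨y, hyb, x, hx, hb, ?_⟩
          simp only [Prod.mk.injEq]
          exact ⟨by omega, trivial⟩
        · rw [if_neg hyb, PySem.List.pyGetD_natCast,
            List.getD_eq_getElem _ "" (by simpa using hx)] at hb
          simp at hb
    · rintro (⟨k, hk, x', hx', hv, hpair⟩ | ⟨k, hk, x', hx', hv, hpair⟩)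
      · simp only [Prod.mk.injEq] at hpair
        obtain ⟨hk1, hx1⟩ := hpair
        have hxx : x' = x := by exact_mod_cast hx1
        subst hxx
        have hyt : y < T.length := by omega
        left
        rw [if_pos hyt, htop hyt, PySem.List.pyGetD_natCast]
        simp only [show T.length - (y + 1) = k from by omega]
        exact hv
      · simp only [Prod.mk.injEq] at hpair
        obtain ⟨hk1, hx1⟩ := hpair
        have hxx : x' = x := by exact_mod_cast hx1
        subst hxx
        have hyb : y < Bt.length := by omega
        right
        rw [if_pos hyb, hbot hyb, PySem.List.pyGetD_natCast]
        simp only [show y = k from by omega]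
        exact hv

-- ===== VERDICT (by name: the statement is the Claim_ definition above) =====
theorem fold_horizontal_spec : Claim_equal_fold_horizontal := by
  intro paper fold _hdom _hpre
  unfold Spec_fold_horizontal fold_horizontal fold_horizontal_alt
  exact pv_core _ _ _
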